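-- pv_equiv track=rewrite | github.com/RobbertDHuisman/AdventOfCode2024 | day_14/part_2.py | check_right_side
-- ===== SOURCE A (Python) =====
-- def check_right_side(locations, top):
--     directions = []
--     location = [top[0] + 1, top[1] + 1]
--     while location[0] != top[0]:
--         found_right = 0
--         while found_right == 0:
--             for j in locations:
--                 if j[0] == location[0] - 1 and j[1] == location[1]:
--                     location = j
--                     directions.append("left")
--                     found_right = 1
--                     break
--                 elif j[0] == location[0] + 1 and j[1] == location[1] + 1:
--                     location = j
--                     directions.append("down-right")
--                     found_right = 1
--                     break
--                 elif j[0] == location[0] and j[1] == location[1] + 1: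
--                     location = j
--                     directions.append("down")
--                     found_right = 1
--                     break
--
--                 if j == locations[-1]:
--                     found_right = -1
--
--         if found_right == -1:
--             break
--
--     if len(directions) > 8:
--         if directions[0] == "down-right":
--             location = location
--     else:
--         location = [location[0] + 1, location[1] + 1]
--
--     return location
-- ===== SOURCE B (Python) =====
-- def check_right_side(locations, top):
--     # position -> (first index, row), built once; per step look up the three neighbour
--     # targets and take the minimum-index candidate (same tie-break as a first-match scan)
--     first = {}
--     for i, j in enumerate(locations):
--         key = (j[0], j[1])
--         if key not in first:
--             first[key] = (i, j)
--     location = [top[0] + 1, top[1] + 1]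
--     steps = 0
--     while location[0] != top[0]:
--         cands = []
--         for key in ((location[0] - 1, location[1]),
--                     (location[0] + 1, location[1] + 1),
--                     (location[0], location[1] + 1)):
--             if key in first:
--                 cands.append(first[key])
--         if not cands:
--             break
--         _, location = min(cands)
--         steps += 1
--     if steps <= 8:
--         location = [location[0] + 1, location[1] + 1]
--     return location
-- ===== Notes on version B (the rewrite author's own statement) =====
-- stated objective: alternative
-- what changed: B precomputes a position->(first index, row) dictionary once and per step looks up the three neighbour targets, taking the minimum-index candidate (A's tie-break), instead of A's linear rescan of `locations` on every step; B keeps a step counter instead of the direction list.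
-- outside the precondition, e.g. on check_right_side([[9], [0, 1]], [0, 0]): A returns [1, 2], B raises IndexError
import Mathlib
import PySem

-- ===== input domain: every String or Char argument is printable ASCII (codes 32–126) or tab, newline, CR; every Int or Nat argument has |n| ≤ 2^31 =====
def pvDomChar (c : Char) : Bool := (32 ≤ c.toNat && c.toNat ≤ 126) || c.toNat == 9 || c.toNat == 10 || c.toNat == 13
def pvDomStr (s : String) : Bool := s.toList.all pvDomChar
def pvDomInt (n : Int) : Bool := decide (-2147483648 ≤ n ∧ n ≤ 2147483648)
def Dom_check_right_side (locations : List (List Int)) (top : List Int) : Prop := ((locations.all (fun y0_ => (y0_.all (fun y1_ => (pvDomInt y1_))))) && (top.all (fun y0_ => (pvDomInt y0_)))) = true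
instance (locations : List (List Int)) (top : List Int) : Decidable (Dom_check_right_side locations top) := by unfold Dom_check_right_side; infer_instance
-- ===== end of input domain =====

-- B replaces A's per-step rescan of `locations` by a position→(first index, row) dictionary built
-- once, per step looking up the three neighbour targets and taking the minimum-index candidate
-- (A's tie-break); equivalence is about the RETURN value (neither program mutates its arguments).

-- ===== PORT A =====
-- j[0], j[1] / location[0], location[1]; pyGetD is exact under Pre_ (rows and top have length ≥ 2,
-- and the traced location is always either the 2-element start or a row of `locations`)
def pvCoord (j : List Int) : Int × Int := (PySem.List.pyGetD j 0 0, PySem.List.pyGetD j 1 0)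

-- the 'for j in locations' body of A's inner 'while found_right == 0' loop:
-- returns (found_right, location, direction appended), scanning js in order
def pvScanA (last loc : List Int) (fr : Int) : List (List Int) → Int × List Int × Option String
  | [] => (fr, loc, none)
  | j :: js =>
    if (pvCoord j).1 = (pvCoord loc).1 - 1 ∧ (pvCoord j).2 = (pvCoord loc).2 then
      (1, j, some "left")
    else if (pvCoord j).1 = (pvCoord loc).1 + 1 ∧ (pvCoord j).2 = (pvCoord loc).2 + 1 then
      (1, j, some "down-right")
    else if (pvCoord j).1 = (pvCoord loc).1 ∧ (pvCoord j).2 = (pvCoord loc).2 + 1 then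
      (1, j, some "down")
    else
      pvScanA last loc (if j = last then -1 else fr) js

-- A's outer 'while location[0] != top[0]' loop.  The fuel `locations.length + 2` is a totality
-- guard only: each step moves to a row of `locations` with a strictly lex-larger (y, -x), so the
-- loop runs at most locations.length + 1 iterations.  With found_right = 0 (empty `locations`)
-- the Python re-runs the inner while forever; that input is excluded by Pre_.
def pvLoopA (locations : List (List Int)) (last : List Int) (t0 : Int) :
    Nat → List Int → List String → List Int × List String
  | 0, loc, dirs => (loc, dirs)
  | fuel+1, loc, dirs =>
    if (pvCoord loc).1 ≠ t0 then
      match pvScanA last loc 0 locations with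
      | (fr, loc', d) =>
        let dirs' := match d with | some s => dirs ++ [s] | none => dirs
        if fr = 1 then pvLoopA locations last t0 fuel loc' dirs'
        else (loc', dirs')
    else (loc, dirs)

def check_right_side (locations : List (List Int)) (top : List Int) : List Int :=
  let t0 := PySem.List.pyGetD top 0 0
  let t1 := PySem.List.pyGetD top 1 0
  let last := (locations.getLast?).getD []   -- locations[-1]; Pre_ gives locations ≠ []
  let r := pvLoopA locations last t0 (locations.length + 2) [t0 + 1, t1 + 1] []
  if r.2.length > 8 then
    (if r.2.headD "" = "down-right" then r.1 else r.1)   -- Python's no-op branch, kept literally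
  else [(pvCoord r.1).1 + 1, (pvCoord r.1).2 + 1]

-- ===== PORT B =====
-- (j[0], j[1]) on B's side, same ASCII reading as A's accessor
def pvCoordB (j : List Int) : Int × Int := (PySem.List.pyGetD j 0 0, PySem.List.pyGetD j 1 0)

-- first = {}; for i, j in enumerate(locations): keep the first (i, j) per coordinate
def pvBuildFirst (locations : List (List Int)) : PySem.Dict (Int × Int) (Int × List Int) :=
  (PySem.List.enumerate locations 0).foldl
    (fun d p => if d.contains (pvCoordB p.2) then d else d.insert (pvCoordB p.2) p)
    PySem.Dict.empty

-- min(cands): Python's tuple min; the indices are pairwise distinct keys, so only .1 is compared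
def pvMin2 (m p : Int × List Int) : Int × List Int := if p.1 < m.1 then p else m

def pvMinByFst : List (Int × List Int) → Option (Int × List Int)
  | [] => none
  | x :: xs => some (xs.foldl pvMin2 x)

-- B's 'while location[0] != top[0]' loop (loc, steps); same totality fuel as port A
def pvLoopB (first : PySem.Dict (Int × Int) (Int × List Int)) (t0 : Int) :
    Nat → List Int → Int → List Int × Int
  | 0, loc, steps => (loc, steps)
  | fuel+1, loc, steps =>
    if (pvCoordB loc).1 ≠ t0 then
      let cands := [((pvCoordB loc).1 - 1, (pvCoordB loc).2),
                    ((pvCoordB loc).1 + 1, (pvCoordB loc).2 + 1),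
                    ((pvCoordB loc).1, (pvCoordB loc).2 + 1)].filterMap (fun k => first.get? k)
      match pvMinByFst cands with
      | none => (loc, steps)
      | some p => pvLoopB first t0 fuel p.2 (steps + 1)
    else (loc, steps)

def check_right_side_alt (locations : List (List Int)) (top : List Int) : List Int :=
  let first := pvBuildFirst locations
  let t0 := PySem.List.pyGetD top 0 0
  let t1 := PySem.List.pyGetD top 1 0
  let r := pvLoopB first t0 (locations.length + 2) [t0 + 1, t1 + 1] 0
  if r.2 ≤ 8 then [(pvCoordB r.1).1 + 1, (pvCoordB r.1).2 + 1] else r.1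

-- ===== PRECONDITION & SPEC =====
-- Pre_ excludes: empty `locations` (A's inner while loops forever) and rows/top shorter than 2
-- entries (A indexes j[0]/j[1]/top[1] lazily, so a short row raises IndexError only when reached
-- on the traced path, while B's dict build indexes every row up front and raises; this excludes
-- some inputs A returns on, e.g. a never-matching 1-element row — see the cites).
def Pre_check_right_side (locations : List (List Int)) (top : List Int) : Prop :=
  locations ≠ [] ∧ (∀ j ∈ locations, 2 ≤ j.length) ∧ 2 ≤ top.length

instance (locations : List (List Int)) (top : List Int) : Decidable (Pre_check_right_side locations top) := by
  unfold Pre_check_right_side; infer_instance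

def pvWitness_check_right_side : List (List Int) × List Int := ([[9, 9], [0, 1]], [0, 0])

def Spec_check_right_side (locations : List (List Int)) (top : List Int) (out : List Int) : Prop := out = check_right_side_alt locations top
instance (locations : List (List Int)) (top : List Int) (out : List Int) : Decidable (Spec_check_right_side locations top out) := by unfold Spec_check_right_side; infer_instance

-- ===== CLAIM (what is proved, stated in full; the proofs are below) =====
def Claim_equal_check_right_side : Prop := ∀ (locations : List (List Int)) (top : List Int), Dom_check_right_side locations top → Pre_check_right_side locations top → Spec_check_right_side locations top (check_right_side locations top)

-- ===== LEMMAS AND PROOFS =====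

theorem pvCoordB_eq : pvCoordB = pvCoord := rfl

-- the predicate 'j is one of the three neighbour targets of loc'
def pvMatch (loc j : List Int) : Bool :=
  pvCoord j == ((pvCoord loc).1 - 1, (pvCoord loc).2) ||
  pvCoord j == ((pvCoord loc).1 + 1, (pvCoord loc).2 + 1) ||
  pvCoord j == ((pvCoord loc).1, (pvCoord loc).2 + 1)

def pvDir (loc j : List Int) : String :=
  if pvCoord j == ((pvCoord loc).1 - 1, (pvCoord loc).2) then "left"
  else if pvCoord j == ((pvCoord loc).1 + 1, (pvCoord loc).2 + 1) then "down-right"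
  else "down"

theorem pvScanA_eq (last loc : List Int) : ∀ (js : List (List Int)) (fr : Int),
    pvScanA last loc fr js =
      match js.find? (pvMatch loc) with
      | some j => (1, j, some (pvDir loc j))
      | none => ((if last ∈ js then -1 else fr), loc, none) := by
  intro js
  induction js with
  | nil => intro fr; simp [pvScanA]
  | cons j js ih =>
    intro fr
    by_cases h1 : (pvCoord j).1 = (pvCoord loc).1 - 1 ∧ (pvCoord j).2 = (pvCoord loc).2
    · have hm : pvMatch loc j = true := by
        simp [pvMatch, beq_iff_eq, Prod.ext_iff, h1.1, h1.2]
      have hd : pvDir loc j = "left" := by simp [pvDir, Prod.ext_iff, h1.1, h1.2]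
      simp [pvScanA, h1, List.find?, hm, hd]
    · by_cases h2 : (pvCoord j).1 = (pvCoord loc).1 + 1 ∧ (pvCoord j).2 = (pvCoord loc).2 + 1
      · have hm : pvMatch loc j = true := by
          simp [pvMatch, Prod.ext_iff, h2.1, h2.2]
        have c1 : (pvCoord j == ((pvCoord loc).1 - 1, (pvCoord loc).2)) = false := by
          simp [Prod.ext_iff]; omega
        have hd : pvDir loc j = "down-right" := by
          simp [pvDir, c1, Prod.ext_iff, h2.1, h2.2]
        simp [pvScanA, h2, List.find?, hm, hd]
      · by_cases h3 : (pvCoord j).1 = (pvCoord loc).1 ∧ (pvCoord j).2 = (pvCoord loc).2 + 1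
        · have hm : pvMatch loc j = true := by
            simp [pvMatch, Prod.ext_iff, h3.1, h3.2]
          have c1 : (pvCoord j == ((pvCoord loc).1 - 1, (pvCoord loc).2)) = false := by
            simp [Prod.ext_iff]; omega
          have c2 : (pvCoord j == ((pvCoord loc).1 + 1, (pvCoord loc).2 + 1)) = false := by
            simp [Prod.ext_iff]; omega
          have hd : pvDir loc j = "down" := by simp [pvDir, c1, c2]
          simp [pvScanA, h3, List.find?, hm, hd]
        · have hm : pvMatch loc j = false := by
            simp [pvMatch, Prod.ext_iff]
            omega
          simp only [pvScanA, h1, h2, h3, if_false]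
          rw [ih]
          simp only [List.find?, hm, List.mem_cons]
          by_cases hl : j = last
          · simp [hl]
          · have : ¬ last = j := fun h => hl h.symm
            simp [hl, this]

theorem pvBuild_aux (k : Int × Int) : ∀ (e : List (Int × List Int)) (d : PySem.Dict (Int × Int) (Int × List Int)),
    ((e.foldl (fun d p => if d.contains (pvCoord p.2) then d else d.insert (pvCoord p.2) p) d).get? k) =
      ((d.get? k).orElse (fun _ => e.find? (fun p => pvCoord p.2 == k))) := by
  intro e
  induction e with
  | nil =>
    intro d
    cases hg : d.get? k <;> simp [List.find?, hg, Option.orElse]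
  | cons p e ih =>
    intro d
    simp only [List.foldl_cons]
    rw [ih]
    by_cases hc : d.contains (pvCoord p.2) = true
    · rw [if_pos hc]
      cases hg : d.get? k with
      | some v => simp [Option.orElse]
      | none =>
        have hne : pvCoord p.2 ≠ k := by
          intro h
          rw [PySem.Dict.contains_eq_isSome_get?, h, hg] at hc
          simp at hc
        have hb : (pvCoord p.2 == k) = false := by simp [hne]
        simp [Option.orElse, List.find?, hb]
    · rw [if_neg hc]
      by_cases hk : pvCoord p.2 = k
      · have hg : d.get? k = none := by
          rw [← hk]
          rw [PySem.Dict.contains_eq_isSome_get?] at hc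
          simpa using hc
        rw [hk, PySem.Dict.get?_insert_self]
        simp [Option.orElse, hg, List.find?, hk]
      · rw [PySem.Dict.get?_insert, if_neg (fun h => hk h.symm)]
        have hb : (pvCoord p.2 == k) = false := by simp [hk]
        cases hg : d.get? k <;> simp [Option.orElse, List.find?, hb]

theorem pvBuildFirst_get? (locations : List (List Int)) (k : Int × Int) :
    (pvBuildFirst locations).get? k =
      (PySem.List.enumerate locations 0).find? (fun p => pvCoord p.2 == k) := by
  rw [pvBuildFirst]
  simp only [pvCoordB_eq]
  rw [pvBuild_aux]
  simp [Option.orElse]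

theorem pvFoldlMin_reach (p : Int × List Int) : ∀ (l : List (Int × List Int)) (m : Int × List Int),
    (m = p ∨ (p.1 < m.1 ∧ p ∈ l)) → (∀ q ∈ l, q = p ∨ p.1 < q.1) → l.foldl pvMin2 m = p := by
  intro l
  induction l with
  | nil =>
    intro m hm _
    rcases hm with h | ⟨_, h⟩
    · exact h
    · cases h
  | cons q l ih =>
    intro m hm hq
    simp only [List.foldl_cons]
    apply ih
    · rcases hq q (List.mem_cons_self) with hqp | hqgt
      · subst hqp
        rcases hm with rfl | ⟨hlt, _⟩
        · left; simp [pvMin2]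
        · left; rw [pvMin2, if_pos hlt]
      · rcases hm with rfl | ⟨hlt, hmem⟩
        · left; rw [pvMin2, if_neg (by omega)]
        · have hpl : p ∈ l := by
            rcases List.mem_cons.mp hmem with heq | h
            · rw [heq] at hqgt; omega
            · exact h
          right
          refine ⟨?_, hpl⟩
          rw [pvMin2]
          split_ifs <;> omega
    · intro r hr
      exact hq r (List.mem_cons_of_mem _ hr)

theorem pvMin_cons_all_gt (h : Int × List Int) : ∀ (l1 l2 : List (Int × List Int)),
    (∀ q ∈ l1 ++ l2, h.1 < q.1) → pvMinByFst (l1 ++ h :: l2) = some h := by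
  intro l1 l2 H
  cases l1 with
  | nil =>
    simp only [List.nil_append, pvMinByFst]
    exact congrArg some (pvFoldlMin_reach h l2 h (Or.inl rfl)
      (fun q hq => Or.inr (H q (by simpa using hq))))
  | cons x l1 =>
    simp only [List.cons_append, pvMinByFst]
    refine congrArg some (pvFoldlMin_reach h (l1 ++ h :: l2) x
      (Or.inr ⟨H x (by simp), by simp⟩) ?_)
    intro q hq
    rcases List.mem_append.mp hq with h1 | h2
    · exact Or.inr (H q (by simp [h1]))
    · rcases List.mem_cons.mp h2 with rfl | h3
      · exact Or.inl rfl
      · exact Or.inr (H q (by simp [h3]))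

theorem pvFusion (a b c : Int × Int) (hab : a ≠ b) (hac : a ≠ c) (hbc : b ≠ c) :
    ∀ (e : List (Int × List Int)), e.Pairwise (fun x y => x.1 < y.1) →
    pvMinByFst ([a, b, c].filterMap (fun k => e.find? (fun p => pvCoord p.2 == k))) =
      e.find? (fun p => pvCoord p.2 == a || pvCoord p.2 == b || pvCoord p.2 == c) := by
  intro e
  induction e with
  | nil => intro _; simp [List.find?, pvMinByFst]
  | cons h t ih =>
    intro hp
    rw [List.pairwise_cons] at hp
    obtain ⟨hh, hpt⟩ := hp
    have hmem : ∀ (k : Int × Int) (q : Int × List Int),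
        t.find? (fun p => pvCoord p.2 == k) = some q → h.1 < q.1 :=
      fun k q hq => hh q (List.mem_of_find?_eq_some hq)
    by_cases ha : pvCoord h.2 = a
    · have f1 : (h :: t).find? (fun p => pvCoord p.2 == a) = some h := by
        simp [List.find?, ha]
      have f2 : (h :: t).find? (fun p => pvCoord p.2 == b) = t.find? (fun p => pvCoord p.2 == b) := by
        have : (pvCoord h.2 == b) = false := by rw [ha]; simp [hab]
        simp [List.find?, this]
      have f3 : (h :: t).find? (fun p => pvCoord p.2 == c) = t.find? (fun p => pvCoord p.2 == c) := by
        have : (pvCoord h.2 == c) = false := by rw [ha]; simp [hac]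
        simp [List.find?, this]
      have fr : (h :: t).find? (fun p => pvCoord p.2 == a || pvCoord p.2 == b || pvCoord p.2 == c) = some h := by
        simp [List.find?, ha]
      rw [fr]
      rcases ob : t.find? (fun p => pvCoord p.2 == b) with _ | q <;>
        rcases oc : t.find? (fun p => pvCoord p.2 == c) with _ | r <;>
          simp only [List.filterMap, f1, f2, f3, ob, oc]
      · exact pvMin_cons_all_gt h [] [] (by simp)
      · exact pvMin_cons_all_gt h [] [r] (by
          intro q hq; rcases (by simpa using hq : q = r) with rfl; exact hmem c q oc)
      · exact pvMin_cons_all_gt h [] [q] (by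
          intro x hx; rcases (by simpa using hx : x = q) with rfl; exact hmem b x ob)
      · exact pvMin_cons_all_gt h [] [q, r] (by
          intro x hx
          rcases (by simpa using hx : x = q ∨ x = r) with rfl | rfl
          · exact hmem b x ob
          · exact hmem c x oc)
    · by_cases hb : pvCoord h.2 = b
      · have f1 : (h :: t).find? (fun p => pvCoord p.2 == a) = t.find? (fun p => pvCoord p.2 == a) := by
          have : (pvCoord h.2 == a) = false := by simp [ha]
          simp [List.find?, this]
        have f2 : (h :: t).find? (fun p => pvCoord p.2 == b) = some h := by
          simp [List.find?, hb]
        have f3 : (h :: t).find? (fun p => pvCoord p.2 == c) = t.find? (fun p => pvCoord p.2 == c) := by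
          have : (pvCoord h.2 == c) = false := by rw [hb]; simp [hbc]
          simp [List.find?, this]
        have fr : (h :: t).find? (fun p => pvCoord p.2 == a || pvCoord p.2 == b || pvCoord p.2 == c) = some h := by
          simp [List.find?, hb]
        rw [fr]
        rcases oa : t.find? (fun p => pvCoord p.2 == a) with _ | q <;>
          rcases oc : t.find? (fun p => pvCoord p.2 == c) with _ | r <;>
            simp only [List.filterMap, f1, f2, f3, oa, oc]
        · exact pvMin_cons_all_gt h [] [] (by simp)
        · exact pvMin_cons_all_gt h [] [r] (by
            intro x hx; rcases (by simpa using hx : x = r) with rfl; exact hmem c x oc)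
        · exact pvMin_cons_all_gt h [q] [] (by
            intro x hx; rcases (by simpa using hx : x = q) with rfl; exact hmem a x oa)
        · exact pvMin_cons_all_gt h [q] [r] (by
            intro x hx
            rcases (by simpa using hx : x = q ∨ x = r) with rfl | rfl
            · exact hmem a x oa
            · exact hmem c x oc)
      · by_cases hcc : pvCoord h.2 = c
        · have f1 : (h :: t).find? (fun p => pvCoord p.2 == a) = t.find? (fun p => pvCoord p.2 == a) := by
            have : (pvCoord h.2 == a) = false := by simp [ha]
            simp [List.find?, this]
          have f2 : (h :: t).find? (fun p => pvCoord p.2 == b) = t.find? (fun p => pvCoord p.2 == b) := by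
            have : (pvCoord h.2 == b) = false := by simp [hb]
            simp [List.find?, this]
          have f3 : (h :: t).find? (fun p => pvCoord p.2 == c) = some h := by
            simp [List.find?, hcc]
          have fr : (h :: t).find? (fun p => pvCoord p.2 == a || pvCoord p.2 == b || pvCoord p.2 == c) = some h := by
            simp [List.find?, hcc]
          rw [fr]
          rcases oa : t.find? (fun p => pvCoord p.2 == a) with _ | q <;>
            rcases ob : t.find? (fun p => pvCoord p.2 == b) with _ | r <;>
              simp only [List.filterMap, f1, f2, f3, oa, ob]
          · exact pvMin_cons_all_gt h [] [] (by simp)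
          · exact pvMin_cons_all_gt h [r] [] (by
              intro x hx; rcases (by simpa using hx : x = r) with rfl; exact hmem b x ob)
          · exact pvMin_cons_all_gt h [q] [] (by
              intro x hx; rcases (by simpa using hx : x = q) with rfl; exact hmem a x oa)
          · exact pvMin_cons_all_gt h [q, r] [] (by
              intro x hx
              rcases (by simpa using hx : x = q ∨ x = r) with rfl | rfl
              · exact hmem a x oa
              · exact hmem b x ob)
        · have f1 : (h :: t).find? (fun p => pvCoord p.2 == a) = t.find? (fun p => pvCoord p.2 == a) := by
            have : (pvCoord h.2 == a) = false := by simp [ha]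
            simp [List.find?, this]
          have f2 : (h :: t).find? (fun p => pvCoord p.2 == b) = t.find? (fun p => pvCoord p.2 == b) := by
            have : (pvCoord h.2 == b) = false := by simp [hb]
            simp [List.find?, this]
          have f3 : (h :: t).find? (fun p => pvCoord p.2 == c) = t.find? (fun p => pvCoord p.2 == c) := by
            have : (pvCoord h.2 == c) = false := by simp [hcc]
            simp [List.find?, this]
          have fr : (h :: t).find? (fun p => pvCoord p.2 == a || pvCoord p.2 == b || pvCoord p.2 == c) =
              t.find? (fun p => pvCoord p.2 == a || pvCoord p.2 == b || pvCoord p.2 == c) := by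
            have ba : (pvCoord h.2 == a) = false := by simp [ha]
            have bb : (pvCoord h.2 == b) = false := by simp [hb]
            have bc : (pvCoord h.2 == c) = false := by simp [hcc]
            simp [List.find?, ba, bb, bc]
          rw [fr, ← ih hpt]
          simp only [List.filterMap, f1, f2, f3]

theorem pvFind_enum (q : List Int → Bool) : ∀ (xs : List (List Int)) (s : Int),
    ((PySem.List.enumerate xs s).find? (fun p => q p.2)).map (·.2) = xs.find? q := by
  intro xs
  induction xs with
  | nil => intro s; simp [PySem.List.enumerate]
  | cons x xs ih =>
    intro s
    rw [PySem.List.enumerate_cons]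
    simp only [List.find?]
    cases hq : q x <;> simp [ih]

theorem pvLoop_eq (locations : List (List Int)) (hne : locations ≠ []) (t0 : Int) :
    ∀ (fuel : Nat) (loc : List Int) (dirs : List String) (steps : Int),
    (dirs.length : Int) = steps →
    (pvLoopA locations ((locations.getLast?).getD []) t0 fuel loc dirs).1 =
      (pvLoopB (pvBuildFirst locations) t0 fuel loc steps).1 ∧
    ((pvLoopA locations ((locations.getLast?).getD []) t0 fuel loc dirs).2.length : Int) =
      (pvLoopB (pvBuildFirst locations) t0 fuel loc steps).2 := by
  have hlast : (locations.getLast?).getD [] ∈ locations := by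
    cases hl : locations.getLast? with
    | none => cases locations with
      | nil => exact absurd rfl hne
      | cons x xs => simp at hl
    | some a => simpa using List.mem_of_getLast? hl
  intro fuel
  induction fuel with
  | zero => intro loc dirs steps h; exact ⟨rfl, h⟩
  | succ fuel ih =>
    intro loc dirs steps h
    by_cases hc : (pvCoord loc).1 ≠ t0
    · have hab : ((pvCoord loc).1 - 1, (pvCoord loc).2) ≠ ((pvCoord loc).1 + 1, (pvCoord loc).2 + 1) := by
        simp [Prod.ext_iff]
      have hac : ((pvCoord loc).1 - 1, (pvCoord loc).2) ≠ ((pvCoord loc).1, (pvCoord loc).2 + 1) := by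
        simp [Prod.ext_iff]
      have hbc : ((pvCoord loc).1 + 1, (pvCoord loc).2 + 1) ≠ ((pvCoord loc).1, (pvCoord loc).2 + 1) := by
        simp [Prod.ext_iff]
      have hmin : pvMinByFst ([((pvCoord loc).1 - 1, (pvCoord loc).2),
            ((pvCoord loc).1 + 1, (pvCoord loc).2 + 1),
            ((pvCoord loc).1, (pvCoord loc).2 + 1)].filterMap
              (fun k => (pvBuildFirst locations).get? k)) =
          (PySem.List.enumerate locations 0).find? (fun p => pvMatch loc p.2) := by
        have := pvFusion _ _ _ hab hac hbc (PySem.List.enumerate locations 0)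
          (PySem.List.pairwise_lt_enumerate locations 0)
        simp only [pvBuildFirst_get?]
        rw [this]
        rfl
      have hc' : (pvCoordB loc).1 ≠ t0 := by rw [pvCoordB_eq]; exact hc
      rw [pvLoopA, pvLoopB, if_pos hc, if_pos hc', pvScanA_eq]
      simp only [pvCoordB_eq]
      cases hf : locations.find? (pvMatch loc) with
      | none =>
        have he : (PySem.List.enumerate locations 0).find? (fun p => pvMatch loc p.2) = none := by
          have := pvFind_enum (pvMatch loc) locations 0
          rw [hf] at this
          exact Option.map_eq_none_iff.mp this
        simp only [hmin, he, hlast, if_pos]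
        have : ¬ ((-1 : Int) = 1) := by omega
        simp [this, h]
      | some j =>
        have he : ∃ p, (PySem.List.enumerate locations 0).find? (fun p => pvMatch loc p.2) = some p ∧ p.2 = j := by
          have := pvFind_enum (pvMatch loc) locations 0
          rw [hf] at this
          rcases Option.map_eq_some_iff.mp this with ⟨p, hp1, hp2⟩
          exact ⟨p, hp1, hp2⟩
        obtain ⟨p, hp1, hp2⟩ := he
        simp only [hmin, hp1, hp2]
        have := ih j (dirs ++ [pvDir loc j]) (steps + 1) (by simp [← h])
        simpa using this
    · have hc' : ¬ (pvCoordB loc).1 ≠ t0 := by rw [pvCoordB_eq]; exact hc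
      rw [pvLoopA, pvLoopB, if_neg hc, if_neg hc']
      exact ⟨rfl, h⟩

-- ===== VERDICT (by name: the statement is the Claim_ definition above) =====
theorem check_right_side_spec : Claim_equal_check_right_side := by
  intro locations top _ hpre
  unfold Spec_check_right_side
  obtain ⟨hne, -, -⟩ := hpre
  rw [check_right_side, check_right_side_alt]
  simp only [pvCoordB_eq]
  have hl := pvLoop_eq locations hne (PySem.List.pyGetD top 0 0) (locations.length + 2)
    [PySem.List.pyGetD top 0 0 + 1, PySem.List.pyGetD top 1 0 + 1] [] 0 (by simp)
  obtain ⟨h1, h2⟩ := hl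
  simp only [ite_self]
  by_cases h8 : (pvLoopA locations ((locations.getLast?).getD []) (PySem.List.pyGetD top 0 0)
      (locations.length + 2) [PySem.List.pyGetD top 0 0 + 1, PySem.List.pyGetD top 1 0 + 1] []).2.length > 8
  · rw [if_pos h8, if_neg (by omega : ¬ (pvLoopB (pvBuildFirst locations) (PySem.List.pyGetD top 0 0)
      (locations.length + 2) [PySem.List.pyGetD top 0 0 + 1, PySem.List.pyGetD top 1 0 + 1] 0).2 ≤ 8)]
    exact h1
  · rw [if_neg h8, if_pos (by omega : (pvLoopB (pvBuildFirst locations) (PySem.List.pyGetD top 0 0)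
      (locations.length + 2) [PySem.List.pyGetD top 0 0 + 1, PySem.List.pyGetD top 1 0 + 1] 0).2 ≤ 8)]
    rw [h1]
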